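-- pv_equiv track=rewrite | github.com/LorenzHW/Coding-Competitions | kickstart/2019/RoundB/energy_stones.py | maximize_energy
-- ===== SOURCE A (Python) =====
-- class Stone:
--     def __init__(self, time, energy, lose):
--         self.time = time
--         self.energy = energy
--         self.lose = lose
--
-- def maximize_energy(N, stone_values):
--     all_stones = set()
--     for s, e, l in stone_values:
--         all_stones.add(Stone(s, e, l))
--
--     energies = []
--
--     def eat(current_stone, other_stones, current_energy):
--         other_stones = update_other_stones(other_stones, current_stone)
--         for stone in other_stones:
--             os = get_other_stones(stone, other_stones)
--             eat(stone, os, current_energy + stone.energy)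
--
--         if not other_stones:
--             energies.append(current_energy)
--
--     for s in all_stones:
--         others = get_other_stones(s, all_stones)
--         eat(s, others, s.energy)
--
--     energies.sort()
--     max_energy = energies[-1]
--     return max_energy
--
-- def update_other_stones(other_stones, current_stone):
--     for stone in other_stones:
--         stone.energy -= (stone.lose * current_stone.time)
--
--     new_stones = set()
--     for stone in other_stones:
--         if stone.energy >= 0:
--             new_stones.add(stone)
--     return new_stones
--
-- def get_other_stones(current_stone, all_stones):
--     new_stones = set()
--     for stone in all_stones:
--         if stone != current_stone:
--             new_stones.add(Stone(stone.time, stone.energy, stone.lose))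
--     return new_stones
-- ===== SOURCE B (Python) =====
-- def _decay(others, ct):
--     # every other stone loses lose * ct energy; stones at negative energy are gone for good
--     decayed = [(t, e - l * ct, l) for (t, e, l) in others]
--     return [s for s in decayed if s[1] >= 0]
--
-- def maximize_energy(N, stone_values):
--     # Iterative depth-first worklist with a running maximum (no recursion, no collect+sort).
--     stack = []
--     for j in range(len(stone_values)):
--         stack.append((stone_values[j], stone_values[:j] + stone_values[j + 1:],
--                       stone_values[j][1]))
--     stack.reverse()
--     best = None
--     while stack:
--         c, others, acc = stack.pop()
--         rem = _decay(others, c[0])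
--         if not rem:
--             if best is None or acc > best:
--                 best = acc
--         else:
--             # push in reverse so the first remaining stone is explored first
--             for j in reversed(range(len(rem))):
--                 stack.append((rem[j], rem[:j] + rem[j + 1:], acc + rem[j][1]))
--     return best if best is not None else 0
-- ===== Notes on version B (the rewrite author's own statement) =====
-- stated objective: faster
-- what changed: Replaces A's mutating recursive search (which builds sets of stone objects, copies them at every step, collects every leaf energy into one global list and sorts it to take the last element) by an iterative depth-first worklist of plain (stone, remaining, total) tuples with a running maximum - no recursion, no object mutation, no final sort.
import Mathlib
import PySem

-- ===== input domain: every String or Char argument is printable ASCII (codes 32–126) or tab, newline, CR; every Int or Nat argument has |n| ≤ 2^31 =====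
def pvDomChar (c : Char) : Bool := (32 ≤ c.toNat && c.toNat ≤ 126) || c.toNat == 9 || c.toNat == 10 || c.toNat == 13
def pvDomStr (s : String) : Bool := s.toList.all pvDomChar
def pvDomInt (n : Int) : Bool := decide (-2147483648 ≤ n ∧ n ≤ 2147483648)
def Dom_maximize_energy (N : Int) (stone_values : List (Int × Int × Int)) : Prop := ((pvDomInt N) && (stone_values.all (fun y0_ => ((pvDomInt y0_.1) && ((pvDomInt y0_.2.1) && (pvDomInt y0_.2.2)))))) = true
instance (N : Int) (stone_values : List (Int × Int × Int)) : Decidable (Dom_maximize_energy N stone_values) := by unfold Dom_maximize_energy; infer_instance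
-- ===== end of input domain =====

-- B replaces A's mutating recursive search (global leaf list + sort + last element) by an
-- iterative depth-first worklist with a running maximum (measured constant-factor faster).
-- Equivalence is about the RETURN value; A mutates only objects it itself created.

-- ===== PORT A =====
-- Shared modelling helper: Python's "each element of a collection together with the remaining
-- ones" (in A: set iteration + get_other_stones, which copies all stones except the current one;
-- in B: rem[j] with rem[:j] + rem[j+1:]).  A stone (s, e, l) is the triple (time, energy, lose);
-- Python's sets here hold DISTINCT objects, so they are modelled by lists in insertion order
-- (the set order only permutes A's 'energies' list, which is sorted before use).
def pvPicks {α : Type} : List α → List (α × List α)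
  | [] => []
  | x :: xs => (x, xs) :: (pvPicks xs).map (fun p => (p.1, x :: p.2))

-- needed by the ports' termination proofs (cited in decreasing_by)
theorem pvPicks_snd_length {α : Type} : ∀ (l : List α), ∀ p ∈ pvPicks l, p.2.length + 1 = l.length := by
  intro l
  induction l with
  | nil => intro p hp; simp [pvPicks] at hp
  | cons x xs ih =>
    intro p hp
    simp only [pvPicks, List.mem_cons, List.mem_map] at hp
    rcases hp with h | ⟨q, hq, rfl⟩
    · subst h; simp
    · simpa using ih q hq

theorem pvPicks_length {α : Type} : ∀ (l : List α), (pvPicks l).length = l.length := by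
  intro l
  induction l with
  | nil => rfl
  | cons x xs ih => simp [pvPicks, ih]

-- update_other_stones: decay every other stone by lose * current.time, keep the non-negative ones
def update_other_stones (others : List (Int × Int × Int)) (c : Int × Int × Int) : List (Int × Int × Int) :=
  (others.map (fun st => (st.1, st.2.1 - st.2.2 * c.1, st.2.2))).filter (fun st => decide (0 ≤ st.2.1))

-- the nested 'eat': the leaf energies it appends (in order) to the global 'energies' list
-- ('.attach' only carries the membership fact needed by the termination proof)
def eatA (c : Int × Int × Int) (others : List (Int × Int × Int)) (acc : Int) : List Int :=
  let o2 := update_other_stones others c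
  (pvPicks o2).attach.flatMap (fun p => eatA p.1.1 p.1.2 (acc + p.1.1.2.1)) ++
    (if o2 = [] then [acc] else [])
termination_by others.length
decreasing_by
  have h1 := pvPicks_snd_length o2 p.1 p.2
  have h2 : o2.length ≤ others.length := le_trans (List.length_filter_le _ _) (by simp)
  omega

def maximize_energy (N : Int) (stone_values : List (Int × Int × Int)) : Int :=
  let energies := (pvPicks stone_values).flatMap (fun p => eatA p.1 p.2 p.1.2.1)
  -- energies.sort(); return energies[-1]  (IndexError on an empty list ⇒ outside Pre_)
  (PySem.List.pyGet? (PySem.List.sorted energies (fun x => x) false) (-1)).getD 0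

-- ===== PORT B =====
-- weight of a worklist state and of the whole worklist, for loopB's termination only
def pvWt (st : (Int × Int × Int) × List (Int × Int × Int) × Int) : Nat :=
  (st.2.1.length + 1).factorial

def pvStackWt (l : List ((Int × Int × Int) × List (Int × Int × Int) × Int)) : Nat :=
  (l.map pvWt).sum

theorem pvSumMapConst {α β : Type} : ∀ (l : List α) (g : α → β) (f : β → Nat) (k : Nat),
    (∀ x ∈ l, f (g x) = k) → ((l.map g).map f).sum = l.length * k := by
  intro l g f k h
  induction l with
  | nil => simp
  | cons x xs ih =>
    simp only [List.map_cons, List.sum_cons, List.length_cons]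
    rw [h x (by simp), ih (fun y hy => h y (by simp [hy]))]
    ring

theorem pvChildrenWt (rem : List (Int × Int × Int)) (acc : Int) :
    pvStackWt ((pvPicks rem).map (fun p => (p.1, p.2, acc + p.1.2.1))) =
      rem.length * rem.length.factorial := by
  unfold pvStackWt
  rw [pvSumMapConst (pvPicks rem) _ pvWt rem.length.factorial]
  · rw [pvPicks_length]
  · intro p hp
    have := pvPicks_snd_length rem p hp
    simp only [pvWt]
    rw [this]

-- cited in loopB's decreasing_by
theorem pvLoopB_dec (c : Int × Int × Int) (others : List (Int × Int × Int)) (acc : Int)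
    (rest : List ((Int × Int × Int) × List (Int × Int × Int) × Int))
    (rem : List (Int × Int × Int)) (hlen : rem.length ≤ others.length) (hne : rem ≠ []) :
    pvStackWt ((pvPicks rem).map (fun p => (p.1, p.2, acc + p.1.2.1)) ++ rest) <
      pvStackWt ((c, others, acc) :: rest) := by
  have h0 : 1 ≤ rem.length := by
    cases rem with
    | nil => exact absurd rfl hne
    | cons a t => simp
  have h1 : rem.length * rem.length.factorial < (rem.length + 1).factorial := by
    rw [Nat.factorial_succ]
    exact Nat.mul_lt_mul_of_lt_of_le (Nat.lt_succ_self _) (le_refl _) (Nat.factorial_pos _)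
  have h2 : (rem.length + 1).factorial ≤ (others.length + 1).factorial :=
    Nat.factorial_le (by omega)
  have h3 := pvChildrenWt rem acc
  simp only [pvStackWt, List.map_append, List.sum_append, List.map_cons, List.sum_cons] at *
  have h4 : pvWt (c, others, acc) = (others.length + 1).factorial := rfl
  omega

-- _decay: every other stone loses lose * ct energy; negative stones are gone for good
def pvDecayB (others : List (Int × Int × Int)) (ct : Int) : List (Int × Int × Int) :=
  ((others.map (fun st => (st.1, st.2.1 - st.2.2 * ct, st.2.2))).filter (fun st => decide (0 ≤ st.2.1)))

-- 'if best is None or acc > best: best = acc', as a 2-argument update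
def pvBmax (best : Option Int) (acc : Int) : Option Int :=
  some (match best with | none => acc | some b => if acc > b then acc else b)

-- the worklist loop: pop the top state, decay+filter its others; record the total at a leaf,
-- otherwise push one child state per remaining stone (the worklist top is the list head)
def loopB : List ((Int × Int × Int) × List (Int × Int × Int) × Int) → Option Int → Option Int
  | [], best => best
  | (c, others, acc) :: rest, best =>
    let rem := pvDecayB others c.1
    if _h : rem = [] then
      loopB rest (pvBmax best acc)
    else
      loopB ((pvPicks rem).map (fun p => (p.1, p.2, acc + p.1.2.1)) ++ rest) best
termination_by stack _ => pvStackWt stack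
decreasing_by
  · have : 0 < pvWt (c, others, acc) := Nat.factorial_pos _
    simp only [pvStackWt, List.map_cons, List.sum_cons]
    omega
  · exact pvLoopB_dec c others acc rest rem
      (le_trans (List.length_filter_le _ _) (by simp)) _h

def maximize_energy_alt (N : Int) (stone_values : List (Int × Int × Int)) : Int :=
  (loopB ((pvPicks stone_values).map (fun p => (p.1, p.2, p.1.2.1))) none).getD 0

-- ===== PRECONDITION & SPEC =====
-- Pre_ excludes only the empty stone list, on which A raises IndexError (energies[-1]).
def Pre_maximize_energy (N : Int) (stone_values : List (Int × Int × Int)) : Prop :=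
  stone_values ≠ []
instance (N : Int) (stone_values : List (Int × Int × Int)) : Decidable (Pre_maximize_energy N stone_values) := by unfold Pre_maximize_energy; infer_instance

def pvWitness_maximize_energy : Int × (List (Int × Int × Int)) := (2, [(1, 3, 1), (2, 5, 1)])

def Spec_maximize_energy (N : Int) (stone_values : List (Int × Int × Int)) (out : Int) : Prop := out = maximize_energy_alt N stone_values
instance (N : Int) (stone_values : List (Int × Int × Int)) (out : Int) : Decidable (Spec_maximize_energy N stone_values out) := by unfold Spec_maximize_energy; infer_instance

-- ===== CLAIM (what is proved, stated in full; the proofs are below) =====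
def Claim_equal_maximize_energy : Prop := ∀ (N : Int) (stone_values : List (Int × Int × Int)), Dom_maximize_energy N stone_values → Pre_maximize_energy N stone_values → Spec_maximize_energy N stone_values (maximize_energy N stone_values)

-- ===== LEMMAS AND PROOFS =====

-- Option-level max (none = "no leaf seen yet"); the algebra both ports' results live in.
def pvOM : Option Int → Option Int → Option Int
  | none, m => m
  | some v, none => some v
  | some v, some x => some (if x > v then x else v)

def pvLeaves (st : (Int × Int × Int) × List (Int × Int × Int) × Int) : List Int :=
  eatA st.1 st.2.1 st.2.2

def pvRunMax (l : List Int) (b : Option Int) : Option Int :=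
  l.foldl (fun b x => pvOM b (some x)) b

theorem pvOM_none_right (b : Option Int) : pvOM b none = b := by cases b <;> rfl

theorem pvOM_comm (a b : Option Int) : pvOM a b = pvOM b a := by
  rcases a with _ | v <;> rcases b with _ | x <;>
    first
    | rfl
    | (simp only [pvOM, Option.some.injEq]; split_ifs <;> omega)

theorem pvOM_assoc (a b c : Option Int) : pvOM (pvOM a b) c = pvOM a (pvOM b c) := by
  rcases a with _ | v <;> rcases b with _ | x <;> rcases c with _ | y <;>
    (try simp only [pvOM]) <;> (try split_ifs) <;> (try simp only [pvOM]) <;>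
    (try split_ifs) <;> first | rfl | (simp only [Option.some.injEq]; omega)

theorem pvRunMax_eq_OM : ∀ (l : List Int) (b : Option Int),
    pvRunMax l b = pvOM b (pvRunMax l none) := by
  intro l
  induction l with
  | nil => intro b; simp [pvRunMax, pvOM_none_right]
  | cons x t ih =>
    intro b
    show pvRunMax t (pvOM b (some x)) = pvOM b (pvRunMax t (pvOM none (some x)))
    rw [ih (pvOM b (some x)), ih (pvOM none (some x)), ← pvOM_assoc, ← pvOM_assoc,
      pvOM_none_right b]

theorem pvRunMax_perm {l1 l2 : List Int} (h : l1.Perm l2) :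
    ∀ b, pvRunMax l1 b = pvRunMax l2 b := by
  induction h with
  | nil => intro b; rfl
  | cons x h ih =>
    intro b
    show pvRunMax _ (pvOM b (some x)) = pvRunMax _ (pvOM b (some x))
    exact ih _
  | swap x y l =>
    intro b
    show pvRunMax l (pvOM (pvOM b (some y)) (some x)) = pvRunMax l (pvOM (pvOM b (some x)) (some y))
    rw [pvOM_assoc, pvOM_assoc, pvOM_comm (some y)]
  | trans h1 h2 ih1 ih2 => intro b; rw [ih1 b, ih2 b]

theorem pvRunMax_mem : ∀ (l : List Int) (b : Option Int) (m : Int),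
    pvRunMax l b = some m → m ∈ l ∨ b = some m := by
  intro l
  induction l with
  | nil => intro b m h; exact Or.inr h
  | cons x t ih =>
    intro b m h
    rcases ih (pvOM b (some x)) m h with hm | hb
    · exact Or.inl (List.mem_cons_of_mem _ hm)
    · rcases b with _ | v
      · simp [pvOM] at hb; simp [hb]
      · simp only [pvOM, Option.some.injEq] at hb
        by_cases hc : x > v
        · simp [hc] at hb; simp [hb]
        · simp [hc] at hb; exact Or.inr (by rw [hb])

theorem pvGetLast?_sorted : ∀ (l : List Int), l.Pairwise (· ≤ ·) →
    l.getLast? = pvRunMax l none := by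
  intro l
  induction l with
  | nil => intro _; rfl
  | cons x t ih =>
    intro hp
    rcases t with _ | ⟨y, s⟩
    · rfl
    · have hp' := (List.pairwise_cons.mp hp).2
      have hle := (List.pairwise_cons.mp hp).1
      have htail : (y :: s).getLast? = pvRunMax (y :: s) none := ih hp'
      obtain ⟨m, hm⟩ : ∃ m, (y :: s).getLast? = some m := by
        cases hgl : (y :: s).getLast? with
        | none => simp [List.getLast?_eq_none_iff] at hgl
        | some m => exact ⟨m, rfl⟩
      have hmem : m ∈ y :: s := by
        rcases pvRunMax_mem (y :: s) none m (by rw [← htail, hm]) with h | h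
        · exact h
        · exact absurd h (by simp)
      have hxm : x ≤ m := hle m hmem
      rw [List.getLast?_cons_cons, hm]
      show some m = pvRunMax (y :: s) (pvOM none (some x))
      rw [pvRunMax_eq_OM, ← htail, hm]
      show some m = pvOM (some x) (some m)
      simp only [pvOM, Option.some.injEq]
      split_ifs with hc
      · rfl
      · omega

theorem pvFlatMap_attach {α β : Type} (l : List α) (f : α → List β) :
    l.attach.flatMap (fun p => f p.1) = l.flatMap f := by
  conv_rhs => rw [← List.attach_map_subtype_val l]
  rw [List.flatMap_map]

theorem pvEatA_eq (c : Int × Int × Int) (others : List (Int × Int × Int)) (acc : Int) :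
    eatA c others acc =
      (pvPicks (update_other_stones others c)).flatMap
        (fun p => eatA p.1 p.2 (acc + p.1.2.1)) ++
      (if update_other_stones others c = [] then [acc] else []) := by
  rw [eatA]
  rw [pvFlatMap_attach (pvPicks (update_other_stones others c))
    (fun p => eatA p.1 p.2 (acc + p.1.2.1))]

-- loopB computes the running max of all leaf energies of the states on the worklist
theorem pvLoopB_runMax : ∀ (stack : List ((Int × Int × Int) × List (Int × Int × Int) × Int))
    (best : Option Int), loopB stack best = pvRunMax (stack.flatMap pvLeaves) best := by
  intro stack best
  induction stack, best using loopB.induct with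
  | case1 best => rw [loopB.eq_def]; rfl
  | case2 c others acc rest best rem h ih =>
    rw [loopB.eq_def]
    show (if _h : rem = [] then loopB rest (pvBmax best acc)
      else loopB ((pvPicks rem).map (fun p => (p.1, p.2, acc + p.1.2.1)) ++ rest) best)
      = pvRunMax (List.flatMap pvLeaves ((c, others, acc) :: rest)) best
    rw [dif_pos h]
    have hup : update_other_stones others c = [] := h
    have hleaf : pvLeaves (c, others, acc) = [acc] := by
      show eatA c others acc = [acc]
      rw [pvEatA_eq, hup]
      simp [pvPicks]
    rw [List.flatMap_cons, hleaf]
    have hstep : pvBmax best acc = pvOM best (some acc) := by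
      cases best <;> rfl
    rw [ih, hstep]
    rfl
  | case3 c others acc rest best rem h ih =>
    rw [loopB.eq_def]
    show (if _h : rem = [] then loopB rest (pvBmax best acc)
      else loopB ((pvPicks rem).map (fun p => (p.1, p.2, acc + p.1.2.1)) ++ rest) best)
      = pvRunMax (List.flatMap pvLeaves ((c, others, acc) :: rest)) best
    rw [dif_neg h]
    have hup : update_other_stones others c ≠ [] := h
    rw [ih, List.flatMap_cons, List.flatMap_append]
    have hchild : ((pvPicks rem).map (fun p => (p.1, p.2, acc + p.1.2.1))).flatMap pvLeaves =
        (pvPicks rem).flatMap (fun p => eatA p.1 p.2 (acc + p.1.2.1)) := by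
      rw [List.flatMap_map]
      rfl
    have hleaf : pvLeaves (c, others, acc) =
        (pvPicks rem).flatMap (fun p => eatA p.1 p.2 (acc + p.1.2.1)) := by
      show eatA c others acc = _
      rw [pvEatA_eq, if_neg hup, List.append_nil]
      rfl
    rw [hchild, hleaf]

-- ===== VERDICT (by name: the statement is the Claim_ definition above) =====
theorem maximize_energy_spec : Claim_equal_maximize_energy := by
  intro N sv _ _
  unfold Spec_maximize_energy maximize_energy maximize_energy_alt
  show (PySem.List.pyGet? (PySem.List.sorted
      ((pvPicks sv).flatMap (fun p => eatA p.1 p.2 p.1.2.1)) (fun x => x) false) (-1)).getD 0 =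
    (loopB ((pvPicks sv).map (fun p => (p.1, p.2, p.1.2.1))) none).getD 0
  rw [PySem.List.pyGet?_neg_one, pvLoopB_runMax]
  have hE : (((pvPicks sv).map (fun p => (p.1, p.2, p.1.2.1))).flatMap pvLeaves) =
      (pvPicks sv).flatMap (fun p => eatA p.1 p.2 p.1.2.1) := by
    rw [List.flatMap_map]
    rfl
  rw [hE]
  set E := (pvPicks sv).flatMap (fun p => eatA p.1 p.2 p.1.2.1) with hEdef
  have hpair : (PySem.List.sorted E (fun x => x) false).Pairwise (· ≤ ·) := by
    simpa using PySem.List.sorted_pairwise E (fun x => x)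
  rw [pvGetLast?_sorted _ hpair, pvRunMax_perm (PySem.List.sorted_perm E (fun x => x) false)]
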